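-- pv_equiv track=rewrite | github.com/burd5/codewars_python | mutate_my_strings.py | mutate_my_strings
-- ===== SOURCE A (Python) =====
-- def mutate_my_strings(s1, s2):
--     res = [s1]
--     s1 = list(s1)
--     s2 = list(s2)
--     for i, x in enumerate(s1):
--         if s1[i] != s2[i]:
--             s1[i] = s2[i]
--             res.append(''.join(s1))
--     return '\n'.join(res) + '\n'
-- ===== SOURCE B (Python) =====
-- def mutate_my_strings(s1, s2):
--     res = [s1]
--     for i, (a, b) in enumerate(zip(s1, s2)):
--         if a != b:
--             res.append(s2[:i + 1] + s1[i + 1:])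
--     return '\n'.join(res) + '\n'
-- ===== Notes on version B (the rewrite author's own statement) =====
-- stated objective: simpler
-- what changed: B drops A's mutable char-list state entirely: instead of mutating a shared list in place and re-joining it on every change, B computes each output line directly as the slice concatenation s2[:i+1] + s1[i+1:], iterating over zip(s1, s2).
import Mathlib
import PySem

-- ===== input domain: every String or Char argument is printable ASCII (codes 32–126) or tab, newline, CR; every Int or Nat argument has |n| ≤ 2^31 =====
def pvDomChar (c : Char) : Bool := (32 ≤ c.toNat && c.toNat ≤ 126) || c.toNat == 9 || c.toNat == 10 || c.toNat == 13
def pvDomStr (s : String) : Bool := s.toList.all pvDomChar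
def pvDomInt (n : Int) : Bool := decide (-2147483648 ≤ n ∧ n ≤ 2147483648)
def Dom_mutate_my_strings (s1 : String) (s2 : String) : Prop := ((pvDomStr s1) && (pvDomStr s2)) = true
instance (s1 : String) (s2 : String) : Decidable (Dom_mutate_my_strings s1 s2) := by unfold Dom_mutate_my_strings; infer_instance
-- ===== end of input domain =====

-- B builds each line directly as s2-prefix ++ s1-suffix by slicing instead of mutating a
-- shared char list and re-joining it (objective: simpler; return-value equivalence on Pre_).

-- ===== PORT A =====
-- the for-loop: state is the mutable char list s1 and the accumulator res;
-- s1[i]/s2[i] via pyGet? (none = IndexError, excluded by Pre_); s1[i] = b via List.set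
-- (i comes from enumerate, hence i ≥ 0, so i.toNat is exact)
def mutALoop (s2l : List Char) : List (Int × Char) → List Char → List (List Char) →
    (List Char × List (List Char))
  | [], s1l, res => (s1l, res)
  | (i, _x) :: rest, s1l, res =>
    match PySem.List.pyGet? s1l i, PySem.List.pyGet? s2l i with
    | some a, some b =>
      if a ≠ b then
        mutALoop s2l rest (s1l.set i.toNat b) (res ++ [s1l.set i.toNat b])
      else
        mutALoop s2l rest s1l res
    | _, _ => (s1l, res)  -- Python raises IndexError here; outside Pre_

def mutate_my_strings (s1 : String) (s2 : String) : String :=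
  let s1l := s1.toList
  let s2l := s2.toList
  let st := mutALoop s2l (PySem.List.enumerate s1l) s1l [s1l]
  String.ofList (PySem.Chars.join ['\n'] st.2 ++ ['\n'])

-- ===== PORT B =====
-- the for-loop over enumerate(zip(s1, s2)): only the accumulator res is carried;
-- each appended line is the slice concatenation s2[:i+1] + s1[i+1:]
def mutBLoop (s1l s2l : List Char) : List (Int × (Char × Char)) → List (List Char) →
    List (List Char)
  | [], res => res
  | (i, (a, b)) :: rest, res =>
    if a ≠ b then
      mutBLoop s1l s2l rest
        (res ++ [PySem.List.slice s2l none (some (i + 1)) ++ PySem.List.slice s1l (some (i + 1)) none])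
    else
      mutBLoop s1l s2l rest res

def mutate_my_strings_alt (s1 : String) (s2 : String) : String :=
  let s1l := s1.toList
  let s2l := s2.toList
  let res := mutBLoop s1l s2l (PySem.List.enumerate (s1l.zip s2l)) [s1l]
  String.ofList (PySem.Chars.join ['\n'] res ++ ['\n'])

-- ===== PRECONDITION & SPEC =====
-- Pre_ excludes exactly the inputs where A raises IndexError: len(s1) > len(s2)
def Pre_mutate_my_strings (s1 : String) (s2 : String) : Prop :=
  s1.toList.length ≤ s2.toList.length
instance (s1 : String) (s2 : String) : Decidable (Pre_mutate_my_strings s1 s2) := by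
  unfold Pre_mutate_my_strings; infer_instance

def pvWitness_mutate_my_strings : String × String := ("abc", "axcd")

def Spec_mutate_my_strings (s1 : String) (s2 : String) (out : String) : Prop :=
  out = mutate_my_strings_alt s1 s2
instance (s1 : String) (s2 : String) (out : String) : Decidable (Spec_mutate_my_strings s1 s2 out) := by
  unfold Spec_mutate_my_strings; infer_instance

-- ===== CLAIM (what is proved, stated in full; the proofs are below) =====
def Claim_equal_mutate_my_strings : Prop := ∀ (s1 : String) (s2 : String), Dom_mutate_my_strings s1 s2 → Pre_mutate_my_strings s1 s2 → Spec_mutate_my_strings s1 s2 (mutate_my_strings s1 s2)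

-- ===== LEMMAS AND PROOFS =====

-- loop invariant: after k steps A's mutable list is s2.take k ++ s1.drop k, and both
-- loops produce the same res from there on
theorem mutLoop_eq (s1l0 s2l : List Char) :
    ∀ (t1 : List Char) (k : Nat) (res : List (List Char)),
      s1l0.drop k = t1 → s1l0.length ≤ s2l.length →
      (mutALoop s2l (PySem.List.enumerate t1 (k : Int)) (s2l.take k ++ t1) res).2
        = mutBLoop s1l0 s2l (PySem.List.enumerate (t1.zip (s2l.drop k)) (k : Int)) res := by
  intro t1
  induction t1 with
  | nil => intro k res _ _; simp [PySem.List.enumerate_nil, mutALoop, mutBLoop]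
  | cons a t1 ih =>
    intro k res hdrop hlen
    have hk1 : k < s1l0.length := by
      by_contra h
      simp [List.drop_eq_nil_of_le (Nat.le_of_not_lt h)] at hdrop
    have hk2 : k < s2l.length := lt_of_lt_of_le hk1 hlen
    have hdrop' : s1l0.drop (k + 1) = t1 := by
      rw [← List.tail_drop, hdrop]; rfl
    have hs2k : s2l.drop k = s2l[k] :: s2l.drop (k + 1) := by
      rw [List.drop_eq_getElem_cons hk2]
    -- A's reads
    have hget1 : PySem.List.pyGet? (s2l.take k ++ a :: t1) (k : Int) = some a := by
      rw [PySem.List.pyGet?_natCast]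
      rw [List.getElem?_append_right (by simp [Nat.min_eq_left (Nat.le_of_lt hk2)])]
      simp [Nat.min_eq_left (Nat.le_of_lt hk2)]
    have hget2 : PySem.List.pyGet? s2l (k : Int) = some s2l[k] := by
      rw [PySem.List.pyGet?_natCast]; exact List.getElem?_eq_getElem hk2
    -- A's write: set index k replaces a by s2l[k]
    have hlt : (List.take k s2l).length = k := by simp [Nat.min_eq_left (Nat.le_of_lt hk2)]
    have hstate : List.take k s2l ++ s2l[k] :: t1 = List.take (k + 1) s2l ++ t1 := by
      rw [← List.take_concat_get' s2l k hk2, List.append_assoc]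
      rfl
    have hset : (List.take k s2l ++ a :: t1).set ((k : Int)).toNat s2l[k]
        = List.take (k + 1) s2l ++ t1 := by
      rw [Int.toNat_natCast, List.set_append_right k s2l[k] hlt.le]
      rw [hlt, Nat.sub_self]
      simpa [List.set] using hstate
    -- B's appended line equals A's new joined list
    have hsliceB : PySem.List.slice s2l none (some ((k : Int) + 1)) ++ PySem.List.slice s1l0 (some ((k : Int) + 1)) none
        = List.take (k + 1) s2l ++ t1 := by
      have h1 : ((k : Int) + 1) = ((k + 1 : Nat) : Int) := by push_cast; ring
      rw [h1, PySem.List.slice_to_natCast, PySem.List.slice_from_natCast, hdrop']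
    have hcast : ((k : Int) + 1) = ((k + 1 : Nat) : Int) := by push_cast; ring
    rw [hs2k]
    simp only [List.zip_cons_cons, PySem.List.enumerate_cons]
    simp only [mutALoop, mutBLoop, hget1, hget2]
    by_cases hab : a = s2l[k]
    · simp only [hab, ne_eq, not_true_eq_false, if_false]
      rw [hstate, hcast]
      exact ih (k + 1) res hdrop' hlen
    · simp only [ne_eq, hab, not_false_eq_true, if_true]
      rw [hset, hsliceB, hcast]
      exact ih (k + 1) _ hdrop' hlen

-- ===== VERDICT (by name: the statement is the Claim_ definition above) =====
theorem mutate_my_strings_spec : Claim_equal_mutate_my_strings := by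
  unfold Claim_equal_mutate_my_strings
  intro s1 s2 _ hpre
  unfold Spec_mutate_my_strings mutate_my_strings mutate_my_strings_alt
  have h := mutLoop_eq s1.toList s2.toList s1.toList 0 [s1.toList] rfl hpre
  simp only [List.take_zero, List.drop_zero, List.nil_append, Nat.cast_zero] at h
  simp only [h]
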